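-- pv_equiv track=rewrite | github.com/YeharaMewan/hr-agent-v7 | backend/main.py | _detect_rejection_intent
-- ===== SOURCE A (Python) =====
-- def _detect_rejection_intent(message: str) -> bool:
--     """
--     Detect if user message is rejecting a previous human loop question
--     Returns True if message indicates rejection/disagreement
--     """
--     message_lower = message.lower().strip()
--
--     # Rejection phrases
--     rejection_phrases = [
--         "no", "n", "nope", "nah", "cancel", "abort", "stop", "nevermind", "never mind",
--         "not now", "later", "skip", "ignore", "different", "other", "another"
--     ]
--
--     # Check exact phrases
--     for phrase in rejection_phrases:
--         if phrase == message_lower or message_lower.startswith(phrase + " "):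
--             return True
--
--     return False
-- ===== SOURCE B (Python) =====
-- # B: instead of scanning every phrase with ==/startswith, cut the message's
-- # first one or two space-separated tokens once and test set membership.
--
-- _ONE_WORD = {
--     "no", "n", "nope", "nah", "cancel", "abort", "stop", "nevermind",
--     "later", "skip", "ignore", "different", "other", "another",
-- }
-- _TWO_WORD = {"never mind", "not now"}
--
--
-- def _detect_rejection_intent(message: str) -> bool:
--     s = message.lower().strip()
--     i = s.find(" ")
--     first = s if i < 0 else s[:i]
--     if first in _ONE_WORD:
--         return True
--     if i < 0:
--         return False
--     j = s.find(" ", i + 1)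
--     two = s if j < 0 else s[:j]
--     return two in _TWO_WORD
-- ===== Notes on version B (the rewrite author's own statement) =====
-- stated objective: alternative
-- what changed: Instead of scanning all 16 rejection phrases with ==/startswith per phrase, B cuts the message's first one or two space-separated tokens once (via str.find) and tests them with two set-membership lookups.
import Mathlib
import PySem

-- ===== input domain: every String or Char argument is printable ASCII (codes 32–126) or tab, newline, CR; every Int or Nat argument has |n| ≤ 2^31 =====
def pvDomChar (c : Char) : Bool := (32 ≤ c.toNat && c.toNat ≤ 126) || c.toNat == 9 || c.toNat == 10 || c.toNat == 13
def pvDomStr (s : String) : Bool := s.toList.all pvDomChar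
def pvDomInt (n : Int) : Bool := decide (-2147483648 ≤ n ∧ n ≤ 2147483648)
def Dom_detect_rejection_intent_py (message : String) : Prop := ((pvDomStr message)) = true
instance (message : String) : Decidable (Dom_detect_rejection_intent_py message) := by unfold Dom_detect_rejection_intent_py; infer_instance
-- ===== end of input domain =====

-- B replaces A's per-phrase ==/startswith scan by cutting the first one or two
-- space-separated tokens once and testing set membership (objective: alternative).

-- ===== PORT A =====
def pvRejectionPhrases : List (List Char) :=
  ["no".toList, "n".toList, "nope".toList, "nah".toList, "cancel".toList, "abort".toList,
   "stop".toList, "nevermind".toList, "never mind".toList, "not now".toList,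
   "later".toList, "skip".toList, "ignore".toList, "different".toList, "other".toList,
   "another".toList]

def detect_rejection_intent_py (message : String) : Bool :=
  let message_lower := PySem.Chars.strip (PySem.Chars.lower message.toList)
  pvRejectionPhrases.any (fun p =>
    p == message_lower || PySem.Chars.startswith message_lower (p ++ [' ']))

-- ===== PORT B =====
def pvOneWord : List (List Char) :=
  ["no".toList, "n".toList, "nope".toList, "nah".toList, "cancel".toList, "abort".toList,
   "stop".toList, "nevermind".toList, "later".toList, "skip".toList, "ignore".toList,
   "different".toList, "other".toList, "another".toList]

def pvTwoWord : List (List Char) := ["never mind".toList, "not now".toList]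

def detect_rejection_intent_py_alt (message : String) : Bool :=
  let s := PySem.Chars.strip (PySem.Chars.lower message.toList)
  let i := PySem.Chars.find s [' ']
  let first := if i < 0 then s else PySem.List.slice s none (some i)
  if pvOneWord.contains first then true
  else if i < 0 then false
  else
    let j := PySem.Chars.findFrom s [' '] (i + 1)
    let two := if j < 0 then s else PySem.List.slice s none (some j)
    pvTwoWord.contains two

-- ===== PRECONDITION & SPEC =====
def Spec_detect_rejection_intent_py (message : String) (out : Bool) : Prop := out = detect_rejection_intent_py_alt message
instance (message : String) (out : Bool) : Decidable (Spec_detect_rejection_intent_py message out) := by unfold Spec_detect_rejection_intent_py; infer_instance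

-- ===== CLAIM (what is proved, stated in full; the proofs are below) =====
def Claim_equal_detect_rejection_intent_py : Prop := ∀ (message : String), Dom_detect_rejection_intent_py message → Spec_detect_rejection_intent_py message (detect_rejection_intent_py message)

-- ===== LEMMAS AND PROOFS =====

-- first space-separated token of u, and everything after u's first space
def pvSeg (u : List Char) : List Char := u.takeWhile (· ≠ ' ')
def pvRest (u : List Char) : List Char := (u.dropWhile (· ≠ ' ')).tail

theorem pv_no_space_seg {u : List Char} (h : ' ' ∉ u) : pvSeg u = u := by
  simp only [pvSeg, List.takeWhile_eq_self_iff]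
  intro a ha
  simp only [decide_eq_true_eq]
  exact fun e => h (e ▸ ha)

theorem pv_space_notin_seg (u : List Char) : ' ' ∉ pvSeg u := by
  intro h
  have := List.mem_takeWhile_imp h
  simp at this

theorem pv_singleton_prefix (c : Char) (v : List Char) : [c] <+: v ↔ ∃ t, v = c :: t := by
  cases v with
  | nil => simp
  | cons d t => simp [List.cons_prefix_cons, eq_comm]

theorem pv_singleton_infix (c : Char) (v : List Char) : [c] <:+: v ↔ c ∈ v := by
  constructor
  · intro h; exact h.subset (List.mem_singleton_self c)
  · intro h
    obtain ⟨l, r, rfl⟩ := List.append_of_mem h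
    exact ⟨l, r, by simp⟩

theorem pv_decomp {u : List Char} (h : ' ' ∈ u) : u = pvSeg u ++ ' ' :: pvRest u := by
  induction u with
  | nil => cases h
  | cons c u' ih =>
    by_cases hc : c = ' '
    · subst hc; simp [pvSeg, pvRest]
    · have h' : ' ' ∈ u' := by
        rcases List.mem_cons.mp h with h | h
        · exact absurd h.symm hc
        · exact h
      simp only [pvSeg, pvRest, List.takeWhile_cons, List.dropWhile_cons]
      simp only [show (decide (c ≠ ' ')) = true by simp [hc], if_pos, List.cons_append]
      exact congrArg (c :: ·) (ih h')

-- A's per-phrase test for a phrase without spaces says: the phrase is u's first token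
theorem pv_cond_one (p : List Char) (hp : ' ' ∉ p) (u : List Char) :
    (p = u ∨ p ++ [' '] <+: u) ↔ p = pvSeg u := by
  induction p generalizing u with
  | nil =>
    cases u with
    | nil => simp [pvSeg]
    | cons d u' =>
      by_cases hd : d = ' '
      · subst hd
        simp [pvSeg, List.cons_prefix_cons]
      · simp [pvSeg, hd, List.cons_prefix_cons, show ¬' ' = d from fun e => hd e.symm]
  | cons c p' ih =>
    have hc : c ≠ ' ' := fun e => hp (e ▸ List.mem_cons_self ..)
    have hp' : ' ' ∉ p' := fun h => hp (List.mem_cons_of_mem _ h)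
    cases u with
    | nil => simp [pvSeg]
    | cons d u' =>
      by_cases hd : d = ' '
      · subst hd
        simp [pvSeg, List.cons_prefix_cons, hc]
      · simp only [pvSeg, List.takeWhile_cons, show (decide (d ≠ ' ')) = true by simp [hd],
          if_pos, List.cons_append, List.cons_prefix_cons, List.cons.injEq]
        rw [← pvSeg, ← ih hp' u']
        tauto

-- A's per-phrase test for a two-word phrase: first word is u's first token,
-- and the second word starts what follows u's first space
theorem pv_cond_two (p1 p2 : List Char) (h1 : ' ' ∉ p1) (u : List Char) :
    (p1 ++ ' ' :: p2 = u ∨ (p1 ++ ' ' :: p2) ++ [' '] <+: u) ↔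
      (' ' ∈ u ∧ p1 = pvSeg u ∧ (p2 = pvRest u ∨ p2 ++ [' '] <+: pvRest u)) := by
  induction p1 generalizing u with
  | nil =>
    cases u with
    | nil => simp
    | cons d u' =>
      by_cases hd : d = ' '
      · subst hd
        simp [pvSeg, pvRest, List.cons_prefix_cons]
      · simp [pvSeg, pvRest, hd, List.cons_prefix_cons,
          show ¬' ' = d from fun e => hd e.symm]
  | cons c p1' ih =>
    have hc : c ≠ ' ' := fun e => h1 (e ▸ List.mem_cons_self ..)
    have h1' : ' ' ∉ p1' := fun h => h1 (List.mem_cons_of_mem _ h)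
    cases u with
    | nil => simp
    | cons d u' =>
      by_cases hd : d = ' '
      · subst hd
        simp [pvSeg, List.cons_prefix_cons, hc]
      · simp only [List.cons_append, List.cons.injEq, List.cons_prefix_cons,
          List.mem_cons, show ¬' ' = d from fun e => hd e.symm, false_or, pvSeg,
          List.takeWhile_cons, show (decide (d ≠ ' ')) = true by simp [hd], if_pos,
          pvRest, List.dropWhile_cons]
        have H := ih h1' u'
        rw [← pvSeg] at *
        tauto

theorem pv_split_inj {a a' : List Char} (b b' : List Char) (ha : ' ' ∉ a) (ha' : ' ' ∉ a') :
    a ++ ' ' :: b = a' ++ ' ' :: b' ↔ a = a' ∧ b = b' := by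
  induction a generalizing a' with
  | nil =>
    cases a' with
    | nil => simp
    | cons c t =>
      have : c ≠ ' ' := fun e => ha' (e ▸ List.mem_cons_self ..)
      simp [Ne.symm this]
  | cons c t ih =>
    have hc : c ≠ ' ' := fun e => ha (e ▸ List.mem_cons_self ..)
    have ht : ' ' ∉ t := fun h => ha (List.mem_cons_of_mem _ h)
    cases a' with
    | nil => simp [hc]
    | cons c' t' =>
      have ht' : ' ' ∉ t' := fun h => ha' (List.mem_cons_of_mem _ h)
      simp only [List.cons_append, List.cons.injEq]
      rw [ih ht ht']
      tauto

theorem pv_first_space (u : List Char) (n : Nat)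
    (hmin : ∀ i < n, ¬ [' '] <+: u.drop i) (hn : [' '] <+: u.drop n) :
    u.take n = pvSeg u ∧ u.drop (n + 1) = pvRest u := by
  induction u generalizing n with
  | nil => simp at hn
  | cons c u' ih =>
    cases n with
    | zero =>
      obtain ⟨t, ht⟩ := (pv_singleton_prefix ' ' _).mp hn
      simp only [List.drop_zero] at ht
      cases ht
      simp [pvSeg, pvRest]
    | succ m =>
      have hc : c ≠ ' ' := by
        intro e
        exact hmin 0 (Nat.succ_pos m) (by simp [e])
      have hmin' : ∀ i < m, ¬ [' '] <+: u'.drop i := by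
        intro i hi
        simpa using hmin (i + 1) (by omega)
      have hn' : [' '] <+: u'.drop m := by simpa using hn
      obtain ⟨h1, h2⟩ := ih m hmin' hn'
      constructor
      · simpa [pvSeg, List.takeWhile_cons, hc] using h1
      · simpa [pvRest, List.dropWhile_cons, hc] using h2

-- what B's s.find(" ") yields: -1 with no space, else the first-space position
theorem pv_find_cases (u : List Char) :
    (PySem.Chars.find u [' '] = -1 ∧ ' ' ∉ u) ∨
    (0 ≤ PySem.Chars.find u [' '] ∧ ' ' ∈ u ∧
      (PySem.Chars.find u [' ']).toNat < u.length ∧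
      u.take (PySem.Chars.find u [' ']).toNat = pvSeg u ∧
      u.drop ((PySem.Chars.find u [' ']).toNat + 1) = pvRest u) := by
  by_cases hm : ' ' ∈ u
  · right
    have h0 : 0 ≤ PySem.Chars.find u [' '] :=
      (PySem.Chars.find_nonneg_iff u [' ']).mpr ((pv_singleton_infix ' ' u).mpr hm)
    obtain ⟨hpre, hminim⟩ := PySem.Chars.find_spec h0
    obtain ⟨t, ht⟩ := (pv_singleton_prefix ' ' _).mp hpre
    have hlt : (PySem.Chars.find u [' ']).toNat < u.length := by
      by_contra hge
      rw [List.drop_eq_nil_of_le (by omega)] at ht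
      simp at ht
    obtain ⟨h1, h2⟩ := pv_first_space u (PySem.Chars.find u [' ']).toNat hminim hpre
    exact ⟨h0, hm, hlt, h1, h2⟩
  · left
    exact ⟨(PySem.Chars.find_eq_neg_one_iff u [' ']).mpr
      (fun h => hm ((pv_singleton_infix ' ' u).mp h)), hm⟩

-- B's second cut (up to s.find(" ", i+1)) is the first two tokens of s
theorem pv_take_two (a b : List Char) (m : Nat) :
    (a ++ ' ' :: b).take (a.length + (1 + m)) = a ++ ' ' :: b.take m := by
  have h2 : a.length + (1 + m) - a.length = m + 1 := by omega
  rw [List.take_append, List.take_of_length_le (by omega), h2, List.take_succ_cons]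

theorem pv_second (s : List Char) (hf : 0 ≤ PySem.Chars.find s [' ']) (hm : ' ' ∈ s)
    (hlt : (PySem.Chars.find s [' ']).toNat < s.length)
    (htake : s.take (PySem.Chars.find s [' ']).toNat = pvSeg s)
    (hdrop : s.drop ((PySem.Chars.find s [' ']).toNat + 1) = pvRest s) :
    (if PySem.Chars.findFrom s [' '] (PySem.Chars.find s [' '] + 1) < 0 then s
     else PySem.List.slice s none (some (PySem.Chars.findFrom s [' ']
       (PySem.Chars.find s [' '] + 1)))) = pvSeg s ++ ' ' :: pvSeg (pvRest s) := by
  set k := (PySem.Chars.find s [' ']).toNat with hk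
  have hcast : PySem.Chars.find s [' '] = (k : Int) := (Int.toNat_of_nonneg hf).symm
  have hk1 : k + 1 ≤ s.length := by omega
  have hFF : PySem.Chars.findFrom s [' '] ((k + 1 : Nat) : Int) =
      if PySem.Chars.find (s.drop (k + 1)) [' '] = -1 then -1
      else ((k + 1 : Nat) : Int) + PySem.Chars.find (s.drop (k + 1)) [' '] :=
    PySem.Chars.findFrom_natCast s [' '] (k + 1) hk1
  have hlen : (pvSeg s).length = k := by
    rw [← htake, List.length_take]
    omega
  rw [hcast]
  have harg : ((k : Int) + 1) = ((k + 1 : Nat) : Int) := by push_cast; ring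
  rw [harg, hFF, hdrop]
  rcases pv_find_cases (pvRest s) with ⟨hb, hbm⟩ | ⟨hbf, hbm, hblt, hbtake, _⟩
  · rw [if_pos hb]
    norm_num
    rw [pv_no_space_seg hbm]
    exact pv_decomp hm
  · have hbne : ¬ PySem.Chars.find (pvRest s) [' '] = -1 := by omega
    rw [if_neg hbne]
    have hjpos : (0 : Int) ≤ ((k + 1 : Nat) : Int) + PySem.Chars.find (pvRest s) [' '] := by
      positivity
    rw [if_neg (not_lt.mpr hjpos), PySem.List.slice_to s hjpos]
    have htn : (((k + 1 : Nat) : Int) + PySem.Chars.find (pvRest s) [' ']).toNat =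
        (pvSeg s).length + (1 + (PySem.Chars.find (pvRest s) [' ']).toNat) := by
      omega
    rw [htn]
    calc s.take ((pvSeg s).length + (1 + (PySem.Chars.find (pvRest s) [' ']).toNat))
        = (pvSeg s ++ ' ' :: pvRest s).take
            ((pvSeg s).length + (1 + (PySem.Chars.find (pvRest s) [' ']).toNat)) := by
          rw [← pv_decomp hm]
      _ = pvSeg s ++ ' ' :: (pvRest s).take (PySem.Chars.find (pvRest s) [' ']).toNat :=
          pv_take_two _ _ _
      _ = pvSeg s ++ ' ' :: pvSeg (pvRest s) := by rw [hbtake]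

theorem pv_core (s : List Char) :
    pvRejectionPhrases.any (fun p =>
      p == s || PySem.Chars.startswith s (p ++ [' '])) =
    (let i := PySem.Chars.find s [' ']
     let first := if i < 0 then s else PySem.List.slice s none (some i)
     if pvOneWord.contains first then true
     else if i < 0 then false
     else
       let j := PySem.Chars.findFrom s [' '] (i + 1)
       let two := if j < 0 then s else PySem.List.slice s none (some j)
       pvTwoWord.contains two) := by
  have e1 : "never mind".toList = "never".toList ++ ' ' :: "mind".toList := by decide
  have e2 : "not now".toList = "not".toList ++ ' ' :: "now".toList := by decide
  rw [Bool.eq_iff_iff]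
  simp only [pvRejectionPhrases, List.any_cons, List.any_nil, Bool.or_eq_true,
    beq_iff_eq, PySem.Chars.startswith_iff]
  rw [e1, e2]
  rw [pv_cond_one "no".toList (by decide) s,
      pv_cond_one "n".toList (by decide) s,
      pv_cond_one "nope".toList (by decide) s,
      pv_cond_one "nah".toList (by decide) s,
      pv_cond_one "cancel".toList (by decide) s,
      pv_cond_one "abort".toList (by decide) s,
      pv_cond_one "stop".toList (by decide) s,
      pv_cond_one "nevermind".toList (by decide) s,
      pv_cond_one "later".toList (by decide) s,
      pv_cond_one "skip".toList (by decide) s,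
      pv_cond_one "ignore".toList (by decide) s,
      pv_cond_one "different".toList (by decide) s,
      pv_cond_one "other".toList (by decide) s,
      pv_cond_one "another".toList (by decide) s,
      pv_cond_two "never".toList "mind".toList (by decide) s,
      pv_cond_two "not".toList "now".toList (by decide) s,
      pv_cond_one "mind".toList (by decide) (pvRest s),
      pv_cond_one "now".toList (by decide) (pvRest s)]
  rcases pv_find_cases s with ⟨hf, hm⟩ | ⟨hf, hm, hlt, htake, hdrop⟩
  · simp only [hf, show ((-1:Int) < 0) from by norm_num, if_pos,
      pv_no_space_seg hm, hm, false_and]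
    by_cases hc : pvOneWord.contains s = true
    · rw [if_pos hc]
      simp only [iff_true]
      simp [pvOneWord] at hc
      rcases hc with rfl|rfl|rfl|rfl|rfl|rfl|rfl|rfl|rfl|rfl|rfl|rfl|rfl|rfl <;> decide
    · rw [if_neg hc]
      simp only [Bool.false_eq_true, iff_false]
      simp [pvOneWord] at hc
      obtain ⟨h1,h2,h3,h4,h5,h6,h7,h8,h9,h10,h11,h12,h13,h14⟩ := hc
      rintro (h|h|h|h|h|h|h|h|h|h|h|h|h|h|h|h) <;> simp_all
  · have hnlt : ¬ PySem.Chars.find s [' '] < 0 := not_lt.mpr hf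
    simp only [if_neg hnlt, PySem.List.slice_to s hf, htake]
    by_cases hcont : pvOneWord.contains (pvSeg s) = true
    · rw [if_pos hcont]
      simp only [iff_true]
      simp [pvOneWord] at hcont
      rcases hcont with h|h|h|h|h|h|h|h|h|h|h|h|h|h <;> rw [h] <;> simp
    · rw [if_neg hcont]
      rw [pv_second s hf hm hlt htake hdrop]
      simp [pvOneWord] at hcont
      simp only [pvTwoWord, List.contains_cons, List.contains_nil, Bool.or_eq_true,
        beq_iff_eq, Bool.false_eq_true, or_false]
      rw [e1, e2, pv_split_inj _ _ (pv_space_notin_seg s) (by decide),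
        pv_split_inj _ _ (pv_space_notin_seg s) (by decide)]
      obtain ⟨h1,h2,h3,h4,h5,h6,h7,h8,h9,h10,h11,h12,h13,h14⟩ := hcont
      constructor
      · rintro (h|h|h|h|h|h|h|h|h|h|h|h|h|h|h|h) <;> simp_all
      · rintro (⟨ha, hb⟩ | ⟨ha, hb⟩) <;> simp_all

-- ===== VERDICT (by name: the statement is the Claim_ definition above) =====
theorem detect_rejection_intent_py_spec : Claim_equal_detect_rejection_intent_py := by
  intro message _
  unfold Spec_detect_rejection_intent_py detect_rejection_intent_py detect_rejection_intent_py_alt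
  exact pv_core _
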